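-- pv_equiv track=rewrite | github.com/MJBeltran13/ai_chatbot_shop | main.py | extract_faq_info
-- ===== SOURCE A (Python) =====
-- def extract_faq_info(text):
--     """Extract FAQ information from PDF text"""
--     faq_lines = []
--     lines = text.split('\n')
--
--     # Look for FAQ section
--     in_faq_section = False
--
--     for line in lines:
--         line = line.strip()
--
--         # Check if this line starts FAQ section
--         if any(keyword in line.lower() for keyword in ['frequently asked questions', 'faq:', 'common questions']):
--             in_faq_section = True
--             if 'frequently asked questions' not in line.lower():
--                 faq_lines.append(line)
--             continue
--
--         # Check if we're leaving FAQ section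
--         if in_faq_section and (line.startswith('=') or
--                               any(keyword in line.lower() for keyword in [
--                                   'notes', 'contact', 'technical specifications',
--                                   'warranty information', 'workshop information',
--                                   'payment methods'
--                               ])):
--             break
--
--         # Add lines while in FAQ section
--         if in_faq_section and line:
--             # Skip lines that are clearly not FAQ related
--             if any(skip in line.lower() for skip in ['warranty:', 'payment:', 'location:', 'phone:', 'email:']):
--                 continue
--             faq_lines.append(line)
--
--     # Remove duplicates while preserving order
--     unique_lines = []
--     seen = set()
--
--     for line in faq_lines:
--         line_lower = line.lower().strip()
--         if line_lower not in seen and line_lower: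
--             seen.add(line_lower)
--             unique_lines.append(line.strip())
--
--     if unique_lines:
--         faq_info = "FREQUENTLY ASKED QUESTIONS:\n" + '\n'.join(unique_lines)
--         return faq_info
--     else:
--         return "No FAQ information found in PDF."
-- ===== SOURCE B (Python) =====
-- def _is_start(low):
--     return ('frequently asked questions' in low or 'faq:' in low
--             or 'common questions' in low)
--
--
-- def _is_stop(line):
--     low = line.lower()
--     return (not _is_start(low)
--             and (line.startswith('=')
--                  or any(k in low for k in (
--                      'notes', 'contact', 'technical specifications',
--                      'warranty information', 'workshop information',
--                      'payment methods'))))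
--
--
-- def _keep(line):
--     low = line.lower()
--     if _is_start(low):
--         return 'frequently asked questions' not in low
--     return bool(line) and not any(s in low for s in (
--         'warranty:', 'payment:', 'location:', 'phone:', 'email:'))
--
--
-- def extract_faq_info(text):
--     """Extract FAQ information from PDF text"""
--     stripped = [raw.strip() for raw in text.split('\n')]
--     n = len(stripped)
--     # delimit the FAQ section with two cursors instead of a scan flag
--     i = 0
--     while i < n and not _is_start(stripped[i].lower()):
--         i += 1
--     j = i
--     while j < n and not _is_stop(stripped[j]):
--         j += 1
--     # dedup by first occurrence of the lowercase key, via dict insertion order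
--     firsts = {}
--     for line in stripped[i:j]:
--         if _keep(line):
--             firsts.setdefault(line.lower(), line)
--     if firsts:
--         return "FREQUENTLY ASKED QUESTIONS:\n" + '\n'.join(firsts.values())
--     return "No FAQ information found in PDF."
-- ===== Notes on version B (the rewrite author's own statement) =====
-- stated objective: alternative
-- what changed: A is a single stateful scan (in_faq_section flag, break/continue) building an intermediate list, followed by a second dedup pass with a seen-set plus a result list; B is a staged pipeline: strip all lines once, delimit the section with two boundary cursors (no flag, no break), slice it, and deduplicate by first occurrence with one insertion-ordered dict (setdefault/values) instead of a set+list pair.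
import Mathlib
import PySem

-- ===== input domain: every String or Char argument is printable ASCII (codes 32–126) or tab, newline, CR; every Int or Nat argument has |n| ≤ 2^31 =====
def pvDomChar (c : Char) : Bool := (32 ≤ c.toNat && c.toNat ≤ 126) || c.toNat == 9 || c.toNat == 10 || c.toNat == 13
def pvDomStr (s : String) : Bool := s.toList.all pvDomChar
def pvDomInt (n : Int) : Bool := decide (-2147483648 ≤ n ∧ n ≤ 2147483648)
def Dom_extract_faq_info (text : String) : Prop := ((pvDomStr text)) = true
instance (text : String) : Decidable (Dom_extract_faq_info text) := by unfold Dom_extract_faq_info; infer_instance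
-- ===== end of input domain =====

-- B replaces A's flag-driven scan + set/list dedup pass by a staged pipeline:
-- strip all lines, delimit the FAQ section with two cursors, slice, filter,
-- and dedup by first occurrence with one insertion-ordered dict; same return value.

-- ===== PORT A =====
-- first pass of A: the stateful scan over the lines (break = return acc)
def faqLoopA : List String → Bool → List String → List String
  | [], _, acc => acc
  | l :: rest, inFaq, acc =>
    let line := PySem.Str.strip l
    let low := PySem.Str.lower line
    if ["frequently asked questions", "faq:", "common questions"].any
        (fun k => PySem.Str.isIn k low) then
      faqLoopA rest true
        (if PySem.Str.isIn "frequently asked questions" low then acc else acc ++ [line])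
    else if inFaq && (PySem.Str.startswith line "=" ||
        ["notes", "contact", "technical specifications", "warranty information",
         "workshop information", "payment methods"].any (fun k => PySem.Str.isIn k low)) then
      acc
    else if inFaq && line != "" then
      if ["warranty:", "payment:", "location:", "phone:", "email:"].any
          (fun k => PySem.Str.isIn k low) then
        faqLoopA rest inFaq acc
      else
        faqLoopA rest inFaq (acc ++ [line])
    else
      faqLoopA rest inFaq acc

-- second pass of A: dedup with a seen-set and an output list
def dedupA : List String → PySem.Set String → List String → List String
  | [], _, acc => acc
  | l :: rest, seen, acc =>
    let key := PySem.Str.strip (PySem.Str.lower l)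
    if !(PySem.Set.contains seen key) && key != "" then
      dedupA rest (PySem.Set.add seen key) (acc ++ [PySem.Str.strip l])
    else
      dedupA rest seen acc

def extract_faq_info (text : String) : String :=
  let lines := (PySem.Str.split? text "\n").getD []
  let faq_lines := faqLoopA lines false []
  let unique_lines := dedupA faq_lines PySem.Set.empty []
  if unique_lines != [] then
    PySem.Str.join "" ["FREQUENTLY ASKED QUESTIONS:\n", PySem.Str.join "\n" unique_lines]
  else
    "No FAQ information found in PDF."

-- ===== PORT B =====
def isStartAlt (low : String) : Bool :=
  PySem.Str.isIn "frequently asked questions" low || PySem.Str.isIn "faq:" low ||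
    PySem.Str.isIn "common questions" low

def isStopAlt (line : String) : Bool :=
  let low := PySem.Str.lower line
  !(isStartAlt low) && (PySem.Str.startswith line "=" ||
    ["notes", "contact", "technical specifications", "warranty information",
     "workshop information", "payment methods"].any (fun k => PySem.Str.isIn k low))

def keepAlt (line : String) : Bool :=
  let low := PySem.Str.lower line
  if isStartAlt low then
    !(PySem.Str.isIn "frequently asked questions" low)
  else
    line != "" && !(["warranty:", "payment:", "location:", "phone:", "email:"].any
      (fun s => PySem.Str.isIn s low))

-- Source B's first while loop: how many leading lines the cursor i skips
def startCursor : List String → Nat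
  | [] => 0
  | l :: rest => if isStartAlt (PySem.Str.lower l) then 0 else startCursor rest + 1

-- Source B's second while loop: how far the cursor j advances from i
def stopCursor : List String → Nat
  | [] => 0
  | l :: rest => if isStopAlt l then 0 else stopCursor rest + 1

def extract_faq_info_alt (text : String) : String :=
  let stripped := ((PySem.Str.split? text "\n").getD []).map PySem.Str.strip
  let i := startCursor stripped
  let j := i + stopCursor (stripped.drop i)
  let sec := PySem.List.slice stripped (some (i : Int)) (some (j : Int))
  let firsts := sec.foldl
    (fun d line => if keepAlt line then
        PySem.Dict.setdefault d (PySem.Str.lower line) line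
      else d) PySem.Dict.empty
  if firsts.items != [] then
    PySem.Str.join "" ["FREQUENTLY ASKED QUESTIONS:\n", PySem.Str.join "\n" firsts.values]
  else
    "No FAQ information found in PDF."

-- ===== PRECONDITION & SPEC =====
def Spec_extract_faq_info (text : String) (out : String) : Prop := out = extract_faq_info_alt text
instance (text : String) (out : String) : Decidable (Spec_extract_faq_info text out) := by unfold Spec_extract_faq_info; infer_instance

-- ===== CLAIM =====
def Claim_equal_extract_faq_info : Prop := ∀ (text : String), Dom_extract_faq_info text → Spec_extract_faq_info text (extract_faq_info text)

-- ===== LEMMAS AND PROOFS =====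

theorem isspace_lowerChar (c : Char) :
    PySem.Chars.isspace (PySem.Chars.lowerChar c) = PySem.Chars.isspace c := by
  simp only [PySem.Chars.lowerChar]
  split
  · rename_i h
    simp only [PySem.Chars.isupper, Bool.and_eq_true, decide_eq_true_eq, Char.le_def,
      UInt32.le_iff_toNat_le] at h
    have h1 : 65 ≤ c.toNat := h.1
    have h2 : c.toNat ≤ 90 := h.2
    have hv : (Char.ofNat (c.toNat + 32)).toNat = c.toNat + 32 := by
      rw [Char.toNat_ofNat, if_pos]; exact Or.inl (by omega)
    have hL : PySem.Chars.isspace (Char.ofNat (c.toNat + 32)) = false := by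
      simp [PySem.Chars.isspace, hv]; omega
    have hR : PySem.Chars.isspace c = false := by
      simp [PySem.Chars.isspace]; omega
    rw [hL, hR]
  · rfl

theorem pred_comp_eq : (PySem.Chars.isspace ∘ PySem.Chars.lowerChar) = PySem.Chars.isspace :=
  funext isspace_lowerChar

theorem chars_lstrip_lower (l : List Char) :
    PySem.Chars.lstrip (PySem.Chars.lower l) = PySem.Chars.lower (PySem.Chars.lstrip l) := by
  simp only [PySem.Chars.lstrip, PySem.Chars.lower, List.dropWhile_map, pred_comp_eq]

theorem chars_rstrip_lower (l : List Char) :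
    PySem.Chars.rstrip (PySem.Chars.lower l) = PySem.Chars.lower (PySem.Chars.rstrip l) := by
  simp only [PySem.Chars.rstrip, PySem.Chars.lower, ← List.map_reverse, List.dropWhile_map,
    pred_comp_eq]

theorem chars_strip_lower (l : List Char) :
    PySem.Chars.strip (PySem.Chars.lower l) = PySem.Chars.lower (PySem.Chars.strip l) := by
  simp only [PySem.Chars.strip, chars_lstrip_lower, chars_rstrip_lower]

theorem dropWhile_rdropWhile_self {α : Type} (p : α → Bool) (t : List α)
    (ht : List.dropWhile p t = t) :
    List.dropWhile p (List.rdropWhile p t) = List.rdropWhile p t := by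
  rcases hr : List.rdropWhile p t with _ | ⟨c, cs⟩
  · rfl
  · have hpre : List.rdropWhile p t <+: t := List.rdropWhile_prefix p t
    rw [hr] at hpre
    obtain ⟨u, hu⟩ := hpre
    subst hu
    have hnp : ¬ p ((c :: (cs ++ u))[0]) = true :=
      (List.dropWhile_eq_self_iff.mp (by simpa using ht)) (by simp)
    simp only [List.getElem_cons_zero] at hnp
    simp [hnp]

theorem chars_strip_idem (l : List Char) :
    PySem.Chars.strip (PySem.Chars.strip l) = PySem.Chars.strip l := by
  have hr : ∀ x : List Char, PySem.Chars.rstrip x = List.rdropWhile PySem.Chars.isspace x :=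
    fun _ => rfl
  simp only [PySem.Chars.strip, PySem.Chars.lstrip, hr]
  rw [dropWhile_rdropWhile_self PySem.Chars.isspace _ (List.dropWhile_idempotent _ _),
    List.rdropWhile_idempotent]

theorem str_strip_strip (s : String) :
    PySem.Str.strip (PySem.Str.strip s) = PySem.Str.strip s := by
  rw [← String.toList_inj]
  simp only [PySem.Str.toList_strip]
  exact chars_strip_idem s.toList

theorem str_strip_lower (s : String) :
    PySem.Str.strip (PySem.Str.lower s) = PySem.Str.lower (PySem.Str.strip s) := by
  rw [← String.toList_inj]
  simp only [PySem.Str.toList_strip, PySem.Str.toList_lower]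
  exact chars_strip_lower s.toList

theorem str_lower_ne_empty (s : String) (h : s ≠ "") : PySem.Str.lower s ≠ "" := by
  intro hc
  apply h
  rw [← String.toList_eq_nil_iff] at hc ⊢
  rw [PySem.Str.toList_lower, PySem.Chars.lower, List.map_eq_nil_iff] at hc
  exact hc

theorem faqLoopA_append (lines : List String) :
    ∀ (inFaq : Bool) (acc : List String),
      faqLoopA lines inFaq acc = acc ++ faqLoopA lines inFaq [] := by
  induction lines with
  | nil => intro inFaq acc; simp [faqLoopA]
  | cons l rest ih =>
    intro inFaq acc
    simp only [faqLoopA]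
    split_ifs with h1 h2 h3 h4 h5
    · rw [ih true acc]
    · rw [ih true (acc ++ [PySem.Str.strip l]), ih true ([] ++ [PySem.Str.strip l])]
      simp
    · simp
    · rw [ih inFaq acc]
    · rw [ih inFaq (acc ++ [PySem.Str.strip l]), ih inFaq ([] ++ [PySem.Str.strip l])]
      simp
    · rw [ih inFaq acc]

theorem dedupA_append (fl : List String) :
    ∀ (seen : PySem.Set String) (acc : List String),
      dedupA fl seen acc = acc ++ dedupA fl seen [] := by
  induction fl with
  | nil => intro seen acc; simp [dedupA]
  | cons l rest ih =>
    intro seen acc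
    simp only [dedupA]
    split_ifs with h
    · rw [ih _ (acc ++ [PySem.Str.strip l]), ih _ ([] ++ [PySem.Str.strip l])]
      simp
    · rw [ih seen acc]

-- the start-branch test of A is isStartAlt
theorem startiff (low : String) :
    (["frequently asked questions", "faq:", "common questions"].any
      (fun k => PySem.Str.isIn k low)) = isStartAlt low := by
  simp [isStartAlt, Bool.or_assoc]

theorem keepAlt_ne_empty (l : String) (h : keepAlt l = true) : l ≠ "" := by
  intro hc
  subst hc
  exact absurd h (by decide)

-- A's in-section scan is takeWhile + filter over the stripped lines
theorem A_in (M : List String) :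
    faqLoopA M true [] =
      ((M.map PySem.Str.strip).takeWhile (fun l => !isStopAlt l)).filter keepAlt := by
  induction M with
  | nil => simp [faqLoopA]
  | cons m rest ih =>
    simp only [faqLoopA, List.map_cons, List.takeWhile_cons]
    rw [startiff]
    by_cases h1 : isStartAlt (PySem.Str.lower (PySem.Str.strip m)) = true
    · have hstop : isStopAlt (PySem.Str.strip m) = false := by
        simp [isStopAlt, h1]
      rw [if_pos h1, hstop]
      simp only [Bool.not_false, if_true, List.filter_cons]
      have hkeep : keepAlt (PySem.Str.strip m) =
          !(PySem.Str.isIn "frequently asked questions"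
            (PySem.Str.lower (PySem.Str.strip m))) := by
        simp [keepAlt, h1]
      by_cases h2 : PySem.Str.isIn "frequently asked questions"
          (PySem.Str.lower (PySem.Str.strip m)) = true
      · rw [if_pos h2, hkeep, h2]
        simpa using ih
      · rw [if_neg h2, hkeep, eq_false_of_ne_true h2]
        rw [faqLoopA_append rest true ([] ++ [PySem.Str.strip m])]
        simp [ih]
    · rw [if_neg h1]
      simp only [Bool.true_and]
      by_cases h2 : (PySem.Str.startswith (PySem.Str.strip m) "=" ||
          ["notes", "contact", "technical specifications", "warranty information",
           "workshop information", "payment methods"].any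
            (fun k => PySem.Str.isIn k (PySem.Str.lower (PySem.Str.strip m)))) = true
      · have hstop : isStopAlt (PySem.Str.strip m) = true := by
          simp only [isStopAlt]
          rw [eq_false_of_ne_true h1, h2]
          rfl
        rw [if_pos h2, hstop]
        simp
      · have hstop : isStopAlt (PySem.Str.strip m) = false := by
          simp only [isStopAlt]
          rw [eq_false_of_ne_true h2]
          simp
        rw [if_neg h2, hstop]
        simp only [Bool.not_false, if_true, List.filter_cons]
        by_cases h3 : PySem.Str.strip m = ""
        · have : ((PySem.Str.strip m != "")) = false := by simp [h3]
          rw [if_neg (by simp [this])]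
          have hkeep : keepAlt (PySem.Str.strip m) = false := by
            rw [h3]; decide
          rw [hkeep]
          simpa using ih
        · have hne : ((PySem.Str.strip m != "")) = true := by simp [bne_iff_ne, h3]
          rw [if_pos hne]
          by_cases h4 : (["warranty:", "payment:", "location:", "phone:", "email:"].any
              (fun s => PySem.Str.isIn s (PySem.Str.lower (PySem.Str.strip m)))) = true
          · have hkeep : keepAlt (PySem.Str.strip m) = false := by
              simp only [keepAlt]
              rw [if_neg h1, h4]
              simp
            rw [if_pos h4, hkeep]
            simpa using ih
          · have hkeep : keepAlt (PySem.Str.strip m) = true := by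
              simp only [keepAlt]
              rw [if_neg h1, eq_false_of_ne_true h4, hne]
              rfl
            rw [if_neg h4, hkeep]
            rw [faqLoopA_append rest true ([] ++ [PySem.Str.strip m])]
            simp [ih]

-- A's whole first pass is dropWhile + takeWhile + filter over the stripped lines
theorem A_pre (L : List String) :
    faqLoopA L false [] =
      ((((L.map PySem.Str.strip).dropWhile
          (fun l => !isStartAlt (PySem.Str.lower l))).takeWhile
            (fun l => !isStopAlt l)).filter keepAlt) := by
  induction L with
  | nil => simp [faqLoopA]
  | cons l rest ih =>
    simp only [List.map_cons, List.dropWhile_cons]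
    by_cases h1 : isStartAlt (PySem.Str.lower (PySem.Str.strip l)) = true
    · rw [h1]
      simp only [Bool.not_true, Bool.false_eq_true, if_false]
      have hswitch : faqLoopA (l :: rest) false [] = faqLoopA (l :: rest) true [] := by
        simp only [faqLoopA]
        rw [startiff, if_pos h1, if_pos h1]
      rw [hswitch, A_in (l :: rest)]
      simp [List.takeWhile_cons]
    · rw [eq_false_of_ne_true h1]
      simp only [Bool.not_false, if_true]
      have hskip : faqLoopA (l :: rest) false [] = faqLoopA rest false [] := by
        simp only [faqLoopA]
        rw [startiff, if_neg h1]
        simp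
      rw [hskip]
      exact ih

-- the while-loop cursors realise dropWhile and takeWhile
theorem drop_startCursor (xs : List String) :
    xs.drop (startCursor xs) = xs.dropWhile (fun l => !isStartAlt (PySem.Str.lower l)) := by
  induction xs with
  | nil => rfl
  | cons x rest ih =>
    simp only [startCursor, List.dropWhile_cons]
    by_cases h : isStartAlt (PySem.Str.lower x) = true
    · rw [if_pos h, h]
      simp
    · rw [if_neg h, eq_false_of_ne_true h]
      simpa using ih

theorem take_stopCursor (xs : List String) :
    xs.take (stopCursor xs) = xs.takeWhile (fun l => !isStopAlt l) := by
  induction xs with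
  | nil => rfl
  | cons x rest ih =>
    simp only [stopCursor, List.takeWhile_cons]
    by_cases h : isStopAlt x = true
    · rw [if_pos h, h]
      simp
    · rw [if_neg h, eq_false_of_ne_true h]
      simpa using ih

-- A's set/list dedup pass equals B's dict fold, on stripped nonempty lines
theorem dedup_vals (fl : List String) :
    ∀ (d : PySem.Dict String String) (seen : PySem.Set String),
      (∀ l ∈ fl, PySem.Str.strip l = l ∧ l ≠ "") →
      (∀ k, PySem.Set.contains seen k = PySem.Dict.contains d k) →
      (fl.foldl (fun d line => PySem.Dict.setdefault d (PySem.Str.lower line) line) d).values =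
        d.values ++ dedupA fl seen [] := by
  induction fl with
  | nil => intro d seen _ _; simp [dedupA]
  | cons l rest ih =>
    intro d seen hel hrel
    obtain ⟨hl, hne⟩ := hel l (by simp)
    have hkey : PySem.Str.strip (PySem.Str.lower l) = PySem.Str.lower l := by
      rw [str_strip_lower, hl]
    have hkne : PySem.Str.lower l ≠ "" := str_lower_ne_empty l hne
    simp only [List.foldl_cons, dedupA, hkey]
    by_cases hc : PySem.Dict.contains d (PySem.Str.lower l) = true
    · have hs : PySem.Set.contains seen (PySem.Str.lower l) = true := by
        rw [hrel]; exact hc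
      rw [PySem.Dict.setdefault_of_contains d l hc, hs]
      simp only [Bool.not_true, Bool.false_and, Bool.false_eq_true, if_false]
      exact ih d seen (fun x hx => hel x (by simp [hx])) hrel
    · have hs : PySem.Set.contains seen (PySem.Str.lower l) = false := by
        rw [hrel]; exact eq_false_of_ne_true hc
      rw [PySem.Dict.setdefault_of_not_contains d l (eq_false_of_ne_true hc), hs]
      have hcond : (!false && (PySem.Str.lower l != "")) = true := by
        simp [bne_iff_ne, hkne]
      rw [hcond, if_pos rfl]
      have hrel' : ∀ k, PySem.Set.contains (PySem.Set.add seen (PySem.Str.lower l)) k =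
          PySem.Dict.contains (PySem.Dict.insert d (PySem.Str.lower l) l) k := by
        intro k
        rw [Bool.eq_iff_iff]
        rw [PySem.Set.contains_iff, PySem.Dict.contains_insert]
        constructor
        · intro hm
          rcases (PySem.Set.mem_add _ _ _).mp hm with hm | hm
          · simp only [Bool.or_eq_true]
            right
            rw [← hrel]
            exact (PySem.Set.contains_iff _ _).mpr hm
          · simp [hm]
        · intro hm
          rcases Bool.or_eq_true _ _ |>.mp hm with hm | hm
          · exact (PySem.Set.mem_add _ _ _).mpr (Or.inr (by simpa using hm))
          · exact (PySem.Set.mem_add _ _ _).mpr (Or.inl ((PySem.Set.contains_iff _ _).mp (by rw [hrel]; exact hm)))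
      have := ih (PySem.Dict.insert d (PySem.Str.lower l) l)
        (PySem.Set.add seen (PySem.Str.lower l))
        (fun x hx => hel x (by simp [hx])) hrel'
      rw [this]
      rw [dedupA_append rest _ ([] ++ [PySem.Str.strip l])]
      have hvals : (PySem.Dict.insert d (PySem.Str.lower l) l).values = d.values ++ [l] := by
        simp only [PySem.Dict.values,
          PySem.Dict.items_insert_of_not_contains d l (eq_false_of_ne_true hc),
          List.map_append, List.map_cons, List.map_nil]
      rw [hvals, hl]
      simp

-- ===== VERDICT (by name: the statement is the Claim_ definition above) =====
theorem extract_faq_info_spec : Claim_equal_extract_faq_info := by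
  intro text _
  unfold Spec_extract_faq_info extract_faq_info extract_faq_info_alt
  dsimp only
  generalize (PySem.Str.split? text "\n").getD [] = lines
  set S := lines.map PySem.Str.strip with hS
  set i := startCursor S with hi
  set c := stopCursor (S.drop i) with hc
  have hslice : PySem.List.slice S (some (i : Int)) (some ((i + c : Nat) : Int)) =
      ((S.dropWhile (fun l => !isStartAlt (PySem.Str.lower l))).takeWhile
        (fun l => !isStopAlt l)) := by
    rw [PySem.List.slice_natCast]
    rw [Nat.add_sub_cancel_left]
    rw [drop_startCursor] at hc ⊢
    rw [hc, take_stopCursor]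
  rw [hslice]
  set sec := ((S.dropWhile (fun l => !isStartAlt (PySem.Str.lower l))).takeWhile
      (fun l => !isStopAlt l)) with hsec
  have hA : faqLoopA lines false [] = sec.filter keepAlt := A_pre lines
  have hfold : sec.foldl (fun d line => if keepAlt line then
        PySem.Dict.setdefault d (PySem.Str.lower line) line else d) PySem.Dict.empty =
      (sec.filter keepAlt).foldl
        (fun d line => PySem.Dict.setdefault d (PySem.Str.lower line) line)
        PySem.Dict.empty := (List.foldl_filter).symm
  have hel : ∀ l ∈ sec.filter keepAlt, PySem.Str.strip l = l ∧ l ≠ "" := by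
    intro l hlmem
    have hkeep := (List.mem_filter.mp hlmem).2
    have hmemsec : l ∈ sec := (List.mem_filter.mp hlmem).1
    have hmemS : l ∈ S := by
      have h1 : l ∈ (S.dropWhile (fun l => !isStartAlt (PySem.Str.lower l))) :=
        (List.takeWhile_sublist _).mem hmemsec
      exact (List.dropWhile_sublist _).mem h1
    obtain ⟨raw, _, hraw⟩ := List.mem_map.mp (hS ▸ hmemS)
    constructor
    · rw [← hraw]; exact str_strip_strip raw
    · exact keepAlt_ne_empty l hkeep
  have hrel : ∀ k, PySem.Set.contains PySem.Set.empty k =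
      PySem.Dict.contains (PySem.Dict.empty : PySem.Dict String String) k := by
    intro k; rfl
  have hvals := dedup_vals (sec.filter keepAlt) PySem.Dict.empty PySem.Set.empty hel hrel
  rw [hfold, hA, hvals]
  simp only [PySem.Dict.values] at *
  have hemp : (PySem.Dict.empty : PySem.Dict String String).items = [] := rfl
  rcases hitems : ((sec.filter keepAlt).foldl
      (fun d line => PySem.Dict.setdefault d (PySem.Str.lower line) line)
      (PySem.Dict.empty : PySem.Dict String String)).items with _ | ⟨p, ps⟩
  · rw [hitems] at hvals
    simp only [hemp, List.map_nil, List.nil_append] at hvals ⊢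
    rw [← hvals]
    simp
  · rw [hitems] at hvals
    simp only [hemp, List.map_nil, List.nil_append, List.map_cons] at hvals ⊢
    rw [← hvals]
    simp
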